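-- pv_equiv track=rewrite | github.com/RAJAN13-blip/Nowcasting-Earthquake-with-Machine-Learning | dop_notebooks/BSTCalcMethods.py | combine_daily_count_bursts
-- ===== SOURCE A (Python) =====
-- def combine_daily_count_bursts(min_daily_events, number_events, index_events):
--
--     #   This method combines the daily counts into coherent burst event swarms
--
--     temp_burst_index    =   []
--     burst_index_prelim  =   []
--     burst_index         =   []
--
--     for i in range(len(number_events)):
--          #   This is a burst
--         if i == 0 and number_events[0] >= min_daily_events:
--             for j in range(len(index_events[0])):
--                 temp_burst_index.append(index_events[0][j])
--
--         # Allows possibility of including foreshocks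
--         elif i > 0 and i< len(number_events)-1 and number_events[i] < min_daily_events and number_events[i+1] >= min_daily_events:
--             for j in range(len(index_events[i])):
--                 temp_burst_index.append(index_events[i][j])
--
--         #   Start a new burst
--         elif i > 0 and number_events[i] >= min_daily_events and number_events[i-1] < min_daily_events: #   Add this to burst
--             for j in range(len(index_events[i])):
--                 temp_burst_index.append(index_events[i][j])
--
--         #   Add this to the current burst
--         elif i > 0 and number_events[i] >= min_daily_events and number_events[i-1] >= min_daily_events: #   Add this to burst
--             for j in range(len(index_events[i])):
--                 temp_burst_index.append(index_events[i][j])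
--
--         #   Terminate the current burst and reset the temp_burst_index
--         elif i > 0 and number_events[i] < min_daily_events and number_events[i-1] >= min_daily_events and len(temp_burst_index) > 0:
--             burst_index_prelim.append(temp_burst_index)
--             temp_burst_index    =   []
--
--         else:
--             pass
--
--     # Ensure that the number of events in the burst is at least the required minimum
--
--     for i in range(len(burst_index_prelim)):
--         if len(burst_index_prelim[i]) >= min_daily_events:
--             burst_index.append(burst_index_prelim[i])
--
--     return  burst_index
-- ===== SOURCE B (Python) =====
-- def combine_daily_count_bursts(min_daily_events, number_events, index_events):
--     # Run-based reimplementation: find swarm days, group them into consecutive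
--     # runs, keep terminated runs with enough events.
--     n = len(number_events)
--     # Day i belongs to a swarm if it is above threshold, or is an interior day
--     # whose successor is above threshold (foreshock / one-day lull).
--     swarm_days = [i for i in range(n)
--                   if number_events[i] >= min_daily_events
--                   or (0 < i < n - 1 and number_events[i + 1] >= min_daily_events)]
--     # Group consecutive swarm days into runs.
--     runs = []
--     run = []
--     for i in swarm_days:
--         if run and i == run[-1] + 1:
--             run.append(i)
--         else:
--             if run:
--                 runs.append(run)
--             run = [i]
--     if run:
--         runs.append(run)
--     # A run reaching the last day is never terminated, hence not a confirmed burst;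
--     # a burst must be non-empty and contain at least min_daily_events events.
--     out = []
--     for g in runs:
--         if g[-1] == n - 1:
--             continue
--         b = []
--         for i in g:
--             b.extend(index_events[i])
--         if b and len(b) >= min_daily_events:
--             out.append(b)
--     return out
-- ===== Notes on version B (the rewrite author's own statement) =====
-- stated objective: alternative
-- what changed: Replaces A's five-branch stateful day-by-day elif chain by a run-based decomposition: first compute the set of swarm days (above threshold, or interior day whose successor is above threshold), group them into maximal consecutive runs, then keep each terminated run's concatenated events if non-empty and at least min_daily_events long.
import Mathlib
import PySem

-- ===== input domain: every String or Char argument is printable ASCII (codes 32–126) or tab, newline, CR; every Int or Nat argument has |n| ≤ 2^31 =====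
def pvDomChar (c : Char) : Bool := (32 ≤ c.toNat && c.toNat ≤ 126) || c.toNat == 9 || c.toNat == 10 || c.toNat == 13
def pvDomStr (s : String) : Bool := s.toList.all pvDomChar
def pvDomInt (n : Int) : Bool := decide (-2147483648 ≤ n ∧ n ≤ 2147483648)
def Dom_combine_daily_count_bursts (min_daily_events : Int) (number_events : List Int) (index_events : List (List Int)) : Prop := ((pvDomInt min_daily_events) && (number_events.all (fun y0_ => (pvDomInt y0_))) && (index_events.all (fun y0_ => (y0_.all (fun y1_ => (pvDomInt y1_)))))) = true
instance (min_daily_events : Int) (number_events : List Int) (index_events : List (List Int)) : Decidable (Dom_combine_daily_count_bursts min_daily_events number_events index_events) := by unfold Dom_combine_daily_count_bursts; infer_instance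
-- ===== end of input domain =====

-- B re-implements the burst combination by a run-based decomposition (find swarm days,
-- group them into consecutive runs, keep terminated runs); equal to A on Pre_ (alternative, not faster).


-- ===== PORT A =====
-- inner `for j in range(len(...)): temp.append(...)` loop of A
def pvAInner (ev : List Int) (temp : List Int) : List Int :=
  (List.range ev.length).foldl (fun t j => t ++ [ev.getD j 0]) temp

-- one iteration of A's main `for i in range(len(number_events))` loop; state = (temp_burst_index, burst_index_prelim)
def pvAStep (m : Int) (ne : List Int) (ie : List (List Int))
    (st : List Int × List (List Int)) (i : Nat) : List Int × List (List Int) :=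
  match st with
  | (temp, prelim) =>
  if i = 0 ∧ ne.getD 0 0 ≥ m then
    (pvAInner (ie.getD 0 []) temp, prelim)
  else if 0 < i ∧ i < ne.length - 1 ∧ ne.getD i 0 < m ∧ ne.getD (i + 1) 0 ≥ m then
    (pvAInner (ie.getD i []) temp, prelim)
  else if 0 < i ∧ ne.getD i 0 ≥ m ∧ ne.getD (i - 1) 0 < m then
    (pvAInner (ie.getD i []) temp, prelim)
  else if 0 < i ∧ ne.getD i 0 ≥ m ∧ ne.getD (i - 1) 0 ≥ m then
    (pvAInner (ie.getD i []) temp, prelim)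
  else if 0 < i ∧ ne.getD i 0 < m ∧ ne.getD (i - 1) 0 ≥ m ∧ 0 < temp.length then
    ([], prelim ++ [temp])
  else st

def combine_daily_count_bursts (min_daily_events : Int) (number_events : List Int)
    (index_events : List (List Int)) : List (List Int) :=
  let st := (List.range number_events.length).foldl (pvAStep min_daily_events number_events index_events) ([], [])
  (List.range st.2.length).foldl
    (fun acc i => if ((st.2.getD i []).length : Int) ≥ min_daily_events then acc ++ [st.2.getD i []] else acc) []

-- ===== PORT B =====
-- day i belongs to a swarm: above threshold, or interior day whose successor is above threshold
def pvContrib (m : Int) (ne : List Int) (i : Nat) : Bool :=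
  decide (ne.getD i 0 ≥ m) || (decide (0 < i) && decide (i < ne.length - 1) && decide (ne.getD (i + 1) 0 ≥ m))

-- one iteration of Source B's grouping loop; state = (runs, run)
def pvGroupStep (st : List (List Nat) × List Nat) (i : Nat) : List (List Nat) × List Nat :=
  if st.2 ≠ [] ∧ i = st.2.getLast?.getD 0 + 1 then (st.1, st.2 ++ [i])
  else ((if st.2 ≠ [] then st.1 ++ [st.2] else st.1), [i])

-- `b = []; for i in g: b.extend(index_events[i])`
def pvEvts (ie : List (List Int)) (g : List Nat) : List Int :=
  g.foldl (fun b i => b ++ ie.getD i []) []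

def combine_daily_count_bursts_alt (min_daily_events : Int) (number_events : List Int)
    (index_events : List (List Int)) : List (List Int) :=
  let n := number_events.length
  let swarm_days := (List.range n).filter (pvContrib min_daily_events number_events)
  let st := swarm_days.foldl pvGroupStep ([], [])
  let runs := if st.2 ≠ [] then st.1 ++ [st.2] else st.1
  runs.foldl
    (fun out g =>
      if g.getLast?.getD 0 = n - 1 then out
      else
        let b := pvEvts index_events g
        if b ≠ [] ∧ (b.length : Int) ≥ min_daily_events then out ++ [b] else out) []

-- ===== PRECONDITION & SPEC =====
-- Pre_ excludes exactly the inputs where A raises IndexError: a swarm day (above threshold,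
-- or interior day whose successor is above threshold) whose index has no entry in index_events.
def Pre_combine_daily_count_bursts (min_daily_events : Int) (number_events : List Int) (index_events : List (List Int)) : Prop :=
  ∀ i, i < number_events.length →
    (number_events.getD i 0 ≥ min_daily_events ∨
      (0 < i ∧ i + 1 < number_events.length ∧ number_events.getD (i + 1) 0 ≥ min_daily_events)) →
    i < index_events.length
instance (min_daily_events : Int) (number_events : List Int) (index_events : List (List Int)) : Decidable (Pre_combine_daily_count_bursts min_daily_events number_events index_events) := by unfold Pre_combine_daily_count_bursts; infer_instance

def pvWitness_combine_daily_count_bursts : Int × List Int × List (List Int) :=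
  (2, [3, 0, 2, 2, 0, 1], [[1, 2, 3], [4], [5, 6], [7, 8], [9], [10]])

def Spec_combine_daily_count_bursts (min_daily_events : Int) (number_events : List Int) (index_events : List (List Int)) (out : List (List Int)) : Prop := out = combine_daily_count_bursts_alt min_daily_events number_events index_events
instance (min_daily_events : Int) (number_events : List Int) (index_events : List (List Int)) (out : List (List Int)) : Decidable (Spec_combine_daily_count_bursts min_daily_events number_events index_events out) := by unfold Spec_combine_daily_count_bursts; infer_instance

-- ===== CLAIM (what is proved, stated in full; the proofs are below) =====
def Claim_equal_combine_daily_count_bursts : Prop := ∀ (min_daily_events : Int) (number_events : List Int) (index_events : List (List Int)), Dom_combine_daily_count_bursts min_daily_events number_events index_events → Pre_combine_daily_count_bursts min_daily_events number_events index_events → Spec_combine_daily_count_bursts min_daily_events number_events index_events (combine_daily_count_bursts min_daily_events number_events index_events)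

-- ===== LEMMAS AND PROOFS =====

-- A's inner append loop concatenates the whole event list
theorem pvAInner_eq (ev temp : List Int) : pvAInner ev temp = temp ++ ev := by
  rw [pvAInner, PySem.List.foldl_append_singleton_eq_map]
  congr 1
  apply List.ext_getElem
  · simp
  · intro i h1 h2
    simp only [List.getElem_map, List.getElem_range, List.getD_eq_getElem?_getD]
    simp at h2
    simp [List.getElem?_eq_getElem h2]

-- on a swarm day A appends that day's events to temp
theorem pvAStep_contrib (m : Int) (ne : List Int) (ie : List (List Int))
    (t : List Int) (p : List (List Int)) (i : Nat) (hc : pvContrib m ne i = true) :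
    pvAStep m ne ie (t, p) i = (t ++ ie.getD i [], p) := by
  simp only [pvContrib, Bool.or_eq_true, Bool.and_eq_true, decide_eq_true_eq] at hc
  rcases Nat.eq_zero_or_pos i with hi | hi
  · subst hi
    have h0 : ne.getD 0 0 ≥ m := by
      rcases hc with h | h
      · exact h
      · omega
    simp only [pvAStep]
    rw [if_pos ⟨trivial, h0⟩, pvAInner_eq]
  · have hi0 : ¬ (i = 0 ∧ ne.getD 0 0 ≥ m) := fun h => by omega
    by_cases hlo : ne.getD i 0 < m
    · have h2 : 0 < i ∧ i < ne.length - 1 ∧ ne.getD i 0 < m ∧ ne.getD (i + 1) 0 ≥ m := by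
        rcases hc with h | h
        · omega
        · exact ⟨h.1.1, h.1.2, hlo, h.2⟩
      simp only [pvAStep]
      rw [if_neg hi0, if_pos h2, pvAInner_eq]
    · have hlo' : ne.getD i 0 ≥ m := by omega
      have h2' : ¬ (0 < i ∧ i < ne.length - 1 ∧ ne.getD i 0 < m ∧ ne.getD (i + 1) 0 ≥ m) := by
        omega
      by_cases hp : ne.getD (i - 1) 0 < m
      · simp only [pvAStep]
        rw [if_neg hi0, if_neg h2', if_pos ⟨hi, hlo', hp⟩, pvAInner_eq]
      · have hp' : ne.getD (i - 1) 0 ≥ m := by omega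
        have h3' : ¬ (0 < i ∧ ne.getD i 0 ≥ m ∧ ne.getD (i - 1) 0 < m) := by omega
        simp only [pvAStep]
        rw [if_neg hi0, if_neg h2', if_neg h3', if_pos ⟨hi, hlo', hp'⟩, pvAInner_eq]

-- on a non-swarm day A either flushes temp or does nothing
theorem pvAStep_noncontrib (m : Int) (ne : List Int) (ie : List (List Int))
    (t : List Int) (p : List (List Int)) (i : Nat) (hc : pvContrib m ne i = false) :
    pvAStep m ne ie (t, p) i =
      if 0 < i ∧ ne.getD i 0 < m ∧ ne.getD (i - 1) 0 ≥ m ∧ 0 < t.length then ([], p ++ [t])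
      else (t, p) := by
  have hc' : ¬ (ne.getD i 0 ≥ m ∨ (0 < i ∧ i < ne.length - 1 ∧ ne.getD (i + 1) 0 ≥ m)) := by
    intro h
    have ht : pvContrib m ne i = true := by
      simp only [pvContrib, Bool.or_eq_true, Bool.and_eq_true, decide_eq_true_eq]
      rcases h with h | h
      · exact Or.inl h
      · exact Or.inr ⟨⟨h.1, h.2.1⟩, h.2.2⟩
    exact absurd (ht.symm.trans hc) (by decide)
  have hlo : ne.getD i 0 < m := by
    by_contra hx
    exact hc' (Or.inl (by omega))
  have hfs : ¬ (0 < i ∧ i < ne.length - 1 ∧ ne.getD (i + 1) 0 ≥ m) := fun h => hc' (Or.inr h)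
  rcases Nat.eq_zero_or_pos i with hi | hi
  · subst hi
    simp only [pvAStep]
    split_ifs <;> first | rfl | omega
  · simp only [pvAStep]
    rw [if_neg (by omega), if_neg (fun h => hfs ⟨h.1, h.2.1, h.2.2.2⟩),
      if_neg (by omega), if_neg (by omega)]

-- A's loop state after the first k days
def pvAS (m : Int) (ne : List Int) (ie : List (List Int)) (k : Nat) : List Int × List (List Int) :=
  (List.range k).foldl (pvAStep m ne ie) ([], [])

-- B's grouping state over the swarm days below k
def pvBS (m : Int) (ne : List Int) (k : Nat) : List (List Nat) × List Nat :=
  ((List.range k).filter (pvContrib m ne)).foldl pvGroupStep ([], [])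

theorem pvAS_succ (m : Int) (ne : List Int) (ie : List (List Int)) (k : Nat) :
    pvAS m ne ie (k + 1) = pvAStep m ne ie (pvAS m ne ie k) k := by
  simp [pvAS, List.range_succ]

theorem pvBS_succ (m : Int) (ne : List Int) (k : Nat) :
    pvBS m ne (k + 1) = if pvContrib m ne k then pvGroupStep (pvBS m ne k) k else pvBS m ne k := by
  simp only [pvBS, List.range_succ, List.filter_append, List.foldl_append]
  cases h : pvContrib m ne k <;> simp [h]

theorem pvEvts_concat (ie : List (List Int)) (g : List Nat) (i : Nat) :
    pvEvts ie (g ++ [i]) = pvEvts ie g ++ ie.getD i [] := by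
  simp [pvEvts, List.foldl_append]

-- the invariant linking A's (temp, prelim) to B's (runs, run) after k days
def pvInv (m : Int) (ne : List Int) (ie : List (List Int)) (k : Nat) : Prop :=
  ((pvBS m ne k).2 = [] → (pvBS m ne k).1 = [] ∧ pvAS m ne ie k = ([], [])) ∧
  (∀ g ∈ (pvBS m ne k).1, ∃ j, g.getLast? = some j ∧ j + 2 ≤ k) ∧
  (∀ j, (pvBS m ne k).2.getLast? = some j →
    pvContrib m ne j = true ∧ j < k ∧
    (j + 1 = k → pvAS m ne ie k =
      (pvEvts ie (pvBS m ne k).2,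
        ((pvBS m ne k).1.map (pvEvts ie)).filter (fun b => decide (b ≠ [])))) ∧
    (j + 1 < k → pvAS m ne ie k =
      ([], (((pvBS m ne k).1 ++ [(pvBS m ne k).2]).map (pvEvts ie)).filter (fun b => decide (b ≠ [])))))

theorem pvInv_zero (m : Int) (ne : List Int) (ie : List (List Int)) : pvInv m ne ie 0 := by
  refine ⟨fun _ => ⟨rfl, rfl⟩, by simp [pvBS], fun j hj => by simp [pvBS] at hj⟩

theorem pvInv_succ (m : Int) (ne : List Int) (ie : List (List Int)) (k : Nat)
    (ih : pvInv m ne ie k) : pvInv m ne ie (k + 1) := by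
  obtain ⟨h0, hG, hR⟩ := ih
  have hA1 : pvAS m ne ie (k + 1) = pvAStep m ne ie (pvAS m ne ie k) k := pvAS_succ m ne ie k
  have hGbump : ∀ g ∈ (pvBS m ne k).1, ∃ j, g.getLast? = some j ∧ j + 2 ≤ k + 1 := by
    intro g hg
    obtain ⟨j2, hj2, hb⟩ := hG g hg
    exact ⟨j2, hj2, by omega⟩
  cases hc : pvContrib m ne k with
  | true =>
    have hB1 : pvBS m ne (k + 1) = pvGroupStep (pvBS m ne k) k := by
      rw [pvBS_succ, hc]
      simp
    by_cases hre : (pvBS m ne k).2 = []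
    · obtain ⟨hg1, hg2⟩ := h0 hre
      have hGS : pvGroupStep (pvBS m ne k) k = ([], [k]) := by
        simp [pvGroupStep, hre, hg1]
      have hAx : pvAStep m ne ie (pvAS m ne ie k) k = ([] ++ ie.getD k [], []) := by
        rw [hg2]
        exact pvAStep_contrib m ne ie [] [] k hc
      unfold pvInv
      rw [hB1, hGS, hA1, hAx]
      dsimp only
      refine ⟨fun h => absurd h (by simp), fun g hg => absurd hg (by simp), fun j' hj' => ?_⟩
      rw [List.getLast?_singleton] at hj'
      obtain rfl := (Option.some.inj hj').symm
      refine ⟨hc, by omega, fun _ => by simp [pvEvts], fun h => by omega⟩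
    · obtain ⟨j, hj⟩ := Option.isSome_iff_exists.mp (List.getLast?_isSome.mpr hre)
      obtain ⟨hcj, hjk, hE1, hE2⟩ := hR j hj
      by_cases hjk1 : j + 1 = k
      · -- extend the active run with day k
        have hGS : pvGroupStep (pvBS m ne k) k = ((pvBS m ne k).1, (pvBS m ne k).2 ++ [k]) := by
          rw [pvGroupStep, if_pos ⟨hre, by rw [hj]; simp only [Option.getD_some]; omega⟩]
        have hAx : pvAStep m ne ie (pvAS m ne ie k) k
            = (pvEvts ie (pvBS m ne k).2 ++ ie.getD k [],
               ((pvBS m ne k).1.map (pvEvts ie)).filter (fun b => decide (b ≠ []))) := by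
          rw [hE1 hjk1]
          exact pvAStep_contrib m ne ie _ _ k hc
        unfold pvInv
        rw [hB1, hGS, hA1, hAx]
        dsimp only
        refine ⟨fun h => absurd h (by simp), hGbump, fun j' hj' => ?_⟩
        rw [List.getLast?_concat] at hj'
        obtain rfl := (Option.some.inj hj').symm
        refine ⟨hc, by omega, fun _ => ?_, fun h => by omega⟩
        rw [pvEvts_concat]
      · -- the pending run is stale: close it, start a new run at day k
        have hjk2 : j + 1 < k := by omega
        have hGS : pvGroupStep (pvBS m ne k) k = ((pvBS m ne k).1 ++ [(pvBS m ne k).2], [k]) := by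
          rw [pvGroupStep,
            if_neg (fun h => by rw [hj] at h; simp only [Option.getD_some] at h; omega),
            if_pos hre]
        have hAx : pvAStep m ne ie (pvAS m ne ie k) k
            = ([] ++ ie.getD k [],
               (((pvBS m ne k).1 ++ [(pvBS m ne k).2]).map (pvEvts ie)).filter
                 (fun b => decide (b ≠ []))) := by
          rw [hE2 hjk2]
          exact pvAStep_contrib m ne ie _ _ k hc
        unfold pvInv
        rw [hB1, hGS, hA1, hAx]
        dsimp only
        refine ⟨fun h => absurd h (by simp), fun g hg => ?_, fun j' hj' => ?_⟩
        · rcases List.mem_append.mp hg with h | h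
          · exact hGbump g h
          · obtain rfl := List.mem_singleton.mp h
            exact ⟨j, hj, by omega⟩
        · rw [List.getLast?_singleton] at hj'
          obtain rfl := (Option.some.inj hj').symm
          refine ⟨hc, by omega, fun _ => by simp [pvEvts], fun h => by omega⟩
  | false =>
    have hB1 : pvBS m ne (k + 1) = pvBS m ne k := by
      rw [pvBS_succ, hc]
      simp
    by_cases hre : (pvBS m ne k).2 = []
    · obtain ⟨hg1, hg2⟩ := h0 hre
      have hAx : pvAStep m ne ie (pvAS m ne ie k) k = ([], []) := by
        rw [hg2, pvAStep_noncontrib m ne ie [] [] k hc, if_neg (by simp)]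
      unfold pvInv
      rw [hB1, hA1, hAx]
      exact ⟨fun _ => ⟨hg1, rfl⟩, hGbump, fun j' hj' => absurd hj' (by rw [hre]; simp)⟩
    · obtain ⟨j, hj⟩ := Option.isSome_iff_exists.mp (List.getLast?_isSome.mpr hre)
      obtain ⟨hcj, hjk, hE1, hE2⟩ := hR j hj
      by_cases hjk1 : j + 1 = k
      · -- day k terminates the active run
        have hgk : ne.getD k 0 < m := by
          by_contra hx
          have ht : pvContrib m ne k = true := by
            simp only [pvContrib, Bool.or_eq_true, decide_eq_true_eq]
            left
            omega
          exact absurd (ht.symm.trans hc) (by decide)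
        have hgj : ne.getD j 0 ≥ m := by
          simp only [pvContrib, Bool.or_eq_true, Bool.and_eq_true, decide_eq_true_eq] at hcj
          rcases hcj with h | h
          · exact h
          · have h2 := h.2
            rw [hjk1] at h2
            omega
        by_cases ht : pvEvts ie (pvBS m ne k).2 = []
        · -- temp is empty: A does not flush, but the run's burst is empty anyway
          have hAx : pvAStep m ne ie (pvAS m ne ie k) k
              = (pvEvts ie (pvBS m ne k).2,
                 ((pvBS m ne k).1.map (pvEvts ie)).filter (fun b => decide (b ≠ []))) := by
            rw [hE1 hjk1, pvAStep_noncontrib m ne ie _ _ k hc, if_neg (by simp [ht])]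
          unfold pvInv
          rw [hB1, hA1, hAx]
          refine ⟨fun h => absurd h hre, hGbump, fun j' hj' => ?_⟩
          rw [hj] at hj'
          obtain rfl := (Option.some.inj hj').symm
          refine ⟨hcj, by omega, fun h => by omega, fun _ => ?_⟩
          rw [ht]
          simp [List.filter_append, ht]
        · -- temp is non-empty: A flushes it
          have hAx : pvAStep m ne ie (pvAS m ne ie k) k
              = ([], ((pvBS m ne k).1.map (pvEvts ie)).filter (fun b => decide (b ≠ []))
                     ++ [pvEvts ie (pvBS m ne k).2]) := by
            rw [hE1 hjk1, pvAStep_noncontrib m ne ie _ _ k hc,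
              if_pos ⟨by omega, hgk, by rw [show k - 1 = j by omega]; exact hgj,
                List.length_pos_iff.mpr ht⟩]
          unfold pvInv
          rw [hB1, hA1, hAx]
          refine ⟨fun h => absurd h hre, hGbump, fun j' hj' => ?_⟩
          rw [hj] at hj'
          obtain rfl := (Option.some.inj hj').symm
          refine ⟨hcj, by omega, fun h => by omega, fun _ => ?_⟩
          simp [List.filter_append, ht]
      · -- nothing happens: temp is already empty and the run already closed
        have hAx : pvAStep m ne ie (pvAS m ne ie k) k
            = ([], (((pvBS m ne k).1 ++ [(pvBS m ne k).2]).map (pvEvts ie)).filter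
                (fun b => decide (b ≠ []))) := by
          rw [hE2 (by omega), pvAStep_noncontrib m ne ie _ _ k hc, if_neg (by simp)]
        unfold pvInv
        rw [hB1, hA1, hAx]
        refine ⟨fun h => absurd h hre, hGbump, fun j' hj' => ?_⟩
        rw [hj] at hj'
        obtain rfl := (Option.some.inj hj').symm
        exact ⟨hcj, by omega, fun h => by omega, fun _ => rfl⟩

theorem pvInv_all (m : Int) (ne : List Int) (ie : List (List Int)) (k : Nat) : pvInv m ne ie k := by
  induction k with
  | zero => exact pvInv_zero m ne ie
  | succ k ih => exact pvInv_succ m ne ie k ih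

-- A's final filtering loop is a List.filter
theorem pvAFilter_eq (m : Int) (p : List (List Int)) (acc : List (List Int)) :
    (List.range p.length).foldl
      (fun acc i => if ((p.getD i []).length : Int) ≥ m then acc ++ [p.getD i []] else acc) acc
    = acc ++ p.filter (fun b => decide ((b.length : Int) ≥ m)) := by
  induction p generalizing acc with
  | nil => simp
  | cons a p ih =>
      rw [List.length_cons, List.range_succ_eq_map, List.foldl_cons, List.foldl_map]
      simp only [List.getD_cons_succ, List.getD_cons_zero]
      rw [ih]
      by_cases h : ((a.length : Int) ≥ m) <;> simp [h]

-- B's output loop over runs none of which end on the last day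
theorem pvBOut_eq (m : Int) (ie : List (List Int)) (n : Nat) (gs : List (List Nat))
    (acc : List (List Int)) (h : ∀ g ∈ gs, g.getLast?.getD 0 ≠ n - 1) :
    gs.foldl
      (fun out g =>
        if g.getLast?.getD 0 = n - 1 then out
        else
          let b := pvEvts ie g
          if b ≠ [] ∧ (b.length : Int) ≥ m then out ++ [b] else out) acc
    = acc ++ (gs.map (pvEvts ie)).filter (fun b => decide (b ≠ []) && decide ((b.length : Int) ≥ m)) := by
  induction gs generalizing acc with
  | nil => simp
  | cons g gs ih =>
      rw [List.foldl_cons, if_neg (h g (by simp))]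
      rw [ih _ (fun g hg => h g (by simp [hg]))]
      by_cases h1 : pvEvts ie g ≠ [] <;> by_cases h2 : ((pvEvts ie g).length : Int) ≥ m <;>
        simp [h1, h2]

-- ===== VERDICT (by name: the statement is the Claim_ definition above) =====
theorem combine_daily_count_bursts_spec : Claim_equal_combine_daily_count_bursts := by
  intro m ne ie _ _
  show combine_daily_count_bursts m ne ie = combine_daily_count_bursts_alt m ne ie
  have hA : combine_daily_count_bursts m ne ie
      = ((pvAS m ne ie ne.length).2).filter (fun b => decide ((b.length : Int) ≥ m)) := by
    simp only [combine_daily_count_bursts]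
    rw [pvAFilter_eq]
    simp only [pvAS, List.nil_append]
  have hB : combine_daily_count_bursts_alt m ne ie
      = (if (pvBS m ne ne.length).2 ≠ [] then
           (pvBS m ne ne.length).1 ++ [(pvBS m ne ne.length).2]
         else (pvBS m ne ne.length).1).foldl
          (fun out g =>
            if g.getLast?.getD 0 = ne.length - 1 then out
            else
              let b := pvEvts ie g
              if b ≠ [] ∧ (b.length : Int) ≥ m then out ++ [b] else out) [] := rfl
  obtain ⟨h0, hG, hR⟩ := pvInv_all m ne ie ne.length
  rw [hA, hB]
  by_cases hre : (pvBS m ne ne.length).2 = []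
  · obtain ⟨hg1, ha⟩ := h0 hre
    rw [ha]
    simp [hre, hg1]
  · obtain ⟨j, hj⟩ := Option.isSome_iff_exists.mp (List.getLast?_isSome.mpr hre)
    obtain ⟨hcj, hjn, hE1, hE2⟩ := hR j hj
    rw [if_pos hre]
    have hGlast : ∀ g ∈ (pvBS m ne ne.length).1, g.getLast?.getD 0 ≠ ne.length - 1 := by
      intro g hg
      obtain ⟨j2, hj2, hb⟩ := hG g hg
      rw [hj2]
      simp only [Option.getD_some]
      omega
    by_cases hjn1 : j + 1 = ne.length
    · -- the pending run reaches the last day: A never flushed it, B drops it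
      have hguard : (pvBS m ne ne.length).2.getLast?.getD 0 = ne.length - 1 := by
        rw [hj]
        simp only [Option.getD_some]
        omega
      rw [List.foldl_append, pvBOut_eq m ie ne.length _ [] hGlast]
      simp only [List.foldl_cons, List.foldl_nil]
      rw [if_pos hguard, hE1 hjn1]
      dsimp only
      rw [List.filter_filter]
      simp only [List.nil_append]
      exact List.filter_congr (fun b _ => Bool.and_comm _ _)
    · -- the pending run was already terminated: both keep it
      have hall : ∀ g ∈ (pvBS m ne ne.length).1 ++ [(pvBS m ne ne.length).2],
          g.getLast?.getD 0 ≠ ne.length - 1 := by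
        intro g hg
        rcases List.mem_append.mp hg with h | h
        · exact hGlast g h
        · obtain rfl := List.mem_singleton.mp h
          rw [hj]
          simp only [Option.getD_some]
          omega
      rw [pvBOut_eq m ie ne.length _ [] hall, hE2 (by omega)]
      dsimp only
      rw [List.filter_filter]
      simp only [List.nil_append]
      exact List.filter_congr (fun b _ => Bool.and_comm _ _)
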